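-- pv_equiv track=rewrite | github.com/dimpart/chatbot-py | libs/utils/__init__.py | zigzag_reduce
-- ===== SOURCE A (Python) =====
-- from typing import List
--
-- def zigzag_reduce(array: List[List]) -> List:
--     snake = []
--     #
--     #  check size
--     #
--     h = len(array)
--     w = 0
--     for line in array:
--         s = len(line)
--         if s > w:
--             w = s
--     n = w + h - 1
--     #
--     #  traverse
--     #
--     x = 0
--     y = 0
--     while x < n and y < n:
--         # pick up existing item
--         if y < len(array):
--             line = array[y]
--             if x < len(line):
--                 snake.append(line[x])
--         # move pointers to next position
--         if y == 0:
--             # next slash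
--             y = x + 1
--             x = 0
--         else:
--             x = x + 1
--             y = y - 1
--     #############################################
--     #                                           #
--     #   0 1 2 3                                 #
--     #   4 5         =>    0 4 1 6 5 2 7 3 8 9   #
--     #   6 7 8 9                                 #
--     #                                           #
--     #############################################
--     return snake
-- ===== SOURCE B (Python) =====
-- from typing import List
--
-- def zigzag_reduce(array: List[List]) -> List:
--     h = len(array)
--     w = max((len(row) for row in array), default=0)
--     out = []
--     for d in range(w + h - 1):
--         for x in range(max(0, d - h + 1), min(d + 1, w)):
--             row = array[d - x]
--             if x < len(row):
--                 out.append(row[x])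
--     return out
-- ===== Notes on version B (the rewrite author's own statement) =====
-- stated objective: faster
-- what changed: Replaces A's single zigzag pointer walk over the whole (w+h-1)x(w+h-1) square with a direct double loop over diagonals d, scanning only the columns x in [max(0,d-h+1), min(d+1,w)) that can hold a cell.
import Mathlib
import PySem

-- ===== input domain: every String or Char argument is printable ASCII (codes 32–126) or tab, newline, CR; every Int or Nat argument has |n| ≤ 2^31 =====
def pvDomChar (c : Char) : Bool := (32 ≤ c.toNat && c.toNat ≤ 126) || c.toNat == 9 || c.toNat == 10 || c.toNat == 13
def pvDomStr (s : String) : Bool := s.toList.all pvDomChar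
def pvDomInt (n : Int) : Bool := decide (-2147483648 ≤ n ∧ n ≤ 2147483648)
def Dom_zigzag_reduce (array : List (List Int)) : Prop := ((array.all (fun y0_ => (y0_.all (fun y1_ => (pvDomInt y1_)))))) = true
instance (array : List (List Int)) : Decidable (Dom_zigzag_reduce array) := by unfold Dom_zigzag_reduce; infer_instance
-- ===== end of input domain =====

-- B replaces A's zigzag pointer walk over the whole (w+h-1)^2 square by a double loop over
-- diagonals with computed column bounds, visiting only candidate cells (objective: faster).


-- ===== PORT A =====
-- the while-loop of A: state (x, y, snake); the fuel argument only bounds the number of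
-- iterations to make the recursion structural (A_eq below proves the bound sufficient)
def pvLoopA (array : List (List Int)) (n x y : Int) (snake : List Int) : Nat → List Int
  | 0 => snake
  | fuel + 1 =>
    if x < n ∧ y < n then
      let snake' :=
        if y < (array.length : Int) then
          match PySem.List.pyGet? array y with
          | some line =>
              if x < (line.length : Int) then
                match PySem.List.pyGet? line x with
                | some v => snake ++ [v]
                | none => snake
              else snake
          | none => snake
        else snake
      if y = 0 then pvLoopA array n 0 (x + 1) snake' fuel
      else pvLoopA array n (x + 1) (y - 1) snake' fuel
    else snake

def zigzag_reduce (array : List (List Int)) : List Int :=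
  let h : Int := (array.length : Int)
  let w : Int := array.foldl (fun w line => if (line.length : Int) > w then (line.length : Int) else w) 0
  let n : Int := w + h - 1
  pvLoopA array n 0 0 [] ((n.toNat + 1) * (n.toNat + 1))

-- ===== PORT B =====
def zigzag_reduce_alt (array : List (List Int)) : List Int :=
  let h : Int := (array.length : Int)
  let w : Int := PySem.List.maxD (array.map (fun row => (row.length : Int))) (fun v => v) 0
  (PySem.List.pyRange 0 (w + h - 1) 1).foldl (fun out d =>
    (PySem.List.pyRange (max 0 (d - h + 1)) (min (d + 1) w) 1).foldl (fun out x =>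
      match PySem.List.pyGet? array (d - x) with
      | some row =>
          if x < (row.length : Int) then
            match PySem.List.pyGet? row x with
            | some v => out ++ [v]
            | none => out
          else out
      | none => out) out) []

-- ===== PRECONDITION & SPEC =====
def Spec_zigzag_reduce (array : List (List Int)) (out : List Int) : Prop := out = zigzag_reduce_alt array
instance (array : List (List Int)) (out : List Int) : Decidable (Spec_zigzag_reduce array out) := by unfold Spec_zigzag_reduce; infer_instance

-- ===== CLAIM (what is proved, stated in full; the proofs are below) =====
def Claim_equal_zigzag_reduce : Prop := ∀ (array : List (List Int)), Dom_zigzag_reduce array → Spec_zigzag_reduce array (zigzag_reduce array)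

-- ===== LEMMAS AND PROOFS =====

-- proof-side notions: maximal row length, the anti-diagonal x + y = d read in
-- increasing column order, and the number of diagonals
def pvW (array : List (List Int)) : Nat := array.foldl (fun m r => max m r.length) 0
def pvDiag (array : List (List Int)) (d : Nat) : List Int :=
  (List.range (d + 1)).filterMap (fun j => (array[d - j]?).bind (fun row => row[j]?))
def pvN (array : List (List Int)) : Nat := ((pvW array : Int) + (array.length : Int) - 1).toNat
def pvCellB (array : List (List Int)) (d x : Int) : List Int :=
  match PySem.List.pyGet? array (d - x) with
  | some row => if x < (row.length : Int) then (PySem.List.pyGet? row x).toList else []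
  | none => []

lemma le_foldl_maxlen : ∀ (t : List (List Int)) (a : Nat), a ≤ t.foldl (fun m r => max m r.length) a := by
  intro t
  induction t with
  | nil => intro a; simp
  | cons r s ih => intro a; exact le_trans (le_max_left a r.length) (ih (max a r.length))

lemma pvLen_le_W (array : List (List Int)) : ∀ row ∈ array, row.length ≤ pvW array := by
  unfold pvW
  generalize (0 : Nat) = a
  induction array generalizing a with
  | nil => simp
  | cons r t ih =>
      intro row hrow
      rcases List.mem_cons.mp hrow with h | h
      · subst h
        exact le_trans (le_trans (le_max_right a row.length) (le_foldl_maxlen t _)) (by simp)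
      · exact ih (max a r.length) row h

-- A's running-maximum width loop computes pvW
lemma pvW_A (array : List (List Int)) : ∀ a : Nat,
    array.foldl (fun w line => if (line.length : Int) > w then (line.length : Int) else w) (a : Int)
      = ((array.foldl (fun m r => max m r.length) a : Nat) : Int) := by
  induction array with
  | nil => intro a; simp
  | cons r t ih =>
      intro a
      have h1 : (if ((r.length : Int)) > (a : Int) then (r.length : Int) else (a : Int))
          = ((max a r.length : Nat) : Int) := by
        split_ifs <;> (congr 1; omega)
      rw [List.foldl_cons, List.foldl_cons, h1, ih]

lemma castfold (t : List (List Int)) : ∀ a : Nat,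
    (t.map (fun row => (row.length : Int))).foldl max ((a : Nat) : Int)
      = ((t.foldl (fun m r => max m r.length) a : Nat) : Int) := by
  induction t with
  | nil => intro a; simp
  | cons r s ih =>
      intro a
      simp only [List.map_cons, List.foldl_cons]
      rw [show max ((a : Nat) : Int) ((r.length : Int)) = (((max a r.length : Nat)) : Int) by
        omega]
      exact ih (max a r.length)

-- B's max(..., default=0) computes pvW as well
lemma pvW_B (array : List (List Int)) :
    PySem.List.maxD (array.map (fun row => (row.length : Int))) (fun v => v) 0
      = ((pvW array : Nat) : Int) := by
  cases array with
  | nil => simp [PySem.List.maxD, PySem.List.max?, pvW]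
  | cons r t =>
      simp only [PySem.List.maxD, List.map_cons]
      rw [PySem.List.max?_id_cons]
      simp only [Option.getD_some]
      rw [castfold t r.length]
      simp [pvW]

-- one loop body of A: the conditional append is "append the cell (x, y) if it exists"
lemma pick_eq (array : List (List Int)) (y x : Nat) (snake : List Int) :
    (if ((y : Nat) : Int) < (array.length : Int) then
        match PySem.List.pyGet? array ((y : Nat) : Int) with
        | some line =>
            if ((x : Nat) : Int) < (line.length : Int) then
              match PySem.List.pyGet? line ((x : Nat) : Int) with
              | some v => snake ++ [v]
              | none => snake
            else snake
        | none => snake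
      else snake)
      = snake ++ ((array[y]?).bind (fun row => row[x]?)).toList := by
  by_cases hy : y < array.length
  · rw [if_pos (by exact_mod_cast hy)]
    rw [PySem.List.pyGet?_natCast, List.getElem?_eq_getElem hy]
    simp only [Option.bind_some]
    by_cases hx : x < (array[y]).length
    · rw [PySem.List.pyGet?_natCast, List.getElem?_eq_getElem hx]
      rw [if_pos (by exact_mod_cast hx)]
      simp
    · rw [if_neg (by exact_mod_cast hx)]
      rw [List.getElem?_eq_none (by omega)]
      simp
  · rw [if_neg (by exact_mod_cast hy)]
    rw [List.getElem?_eq_none (by omega)]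
    simp

-- peeling the first cell off the tail of a diagonal
lemma diag_step (array : List (List Int)) (x y : Nat) :
    (List.range (y + 1 + 1)).filterMap (fun j => (array[y + 1 - j]?).bind (fun row => row[x + j]?))
      = ((array[y + 1]?).bind (fun row => row[x]?)).toList
        ++ (List.range (y + 1)).filterMap (fun j => (array[y - j]?).bind (fun row => row[x + 1 + j]?)) := by
  rw [List.range_succ_eq_map, List.filterMap_cons, List.filterMap_map]
  have hcong : List.filterMap ((fun j => (array[y + 1 - j]?).bind (fun row => row[x + j]?)) ∘ Nat.succ) (List.range (y + 1))
      = List.filterMap (fun j => (array[y - j]?).bind (fun row => row[x + 1 + j]?)) (List.range (y + 1)) := by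
    apply List.filterMap_congr
    intro j hj
    simp only [Function.comp_apply, Nat.succ_eq_add_one,
      show y + 1 - (j + 1) = y - j from by omega,
      show x + (j + 1) = x + 1 + j from by omega]
  rw [hcong]
  simp only [Nat.sub_zero, Nat.add_zero]
  cases (array[y + 1]?).bind (fun row => row[x]?) <;> simp

-- fuel needed to run diagonals d, d+1, …, d+k-1 and the final guard check
def pvFuelAux : Nat → Nat → Nat
  | 0, _ => 1
  | k + 1, d => (d + 1) + pvFuelAux k (d + 1)

lemma pvFuelAux_le : ∀ (k d : Nat), pvFuelAux k d ≤ (d + k + 1) * (k + 1) := by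
  intro k
  induction k with
  | zero => intro d; simp [pvFuelAux]
  | succ k ih =>
      intro d
      calc (d + 1) + pvFuelAux k (d + 1) ≤ (d + 1) + ((d + 1) + k + 1) * (k + 1) :=
            Nat.add_le_add_left (ih (d + 1)) _
        _ ≤ (d + (k + 1) + 1) * ((k + 1) + 1) := by nlinarith

-- A's loop from (x, y) finishes the current diagonal d = x + y and restarts at (0, d + 1)
lemma loop_run (array : List (List Int)) (n : Int) :
    ∀ (y x : Nat) (snake : List Int) (fuel : Nat), ((x : Int) + (y : Int)) < n →
      pvLoopA array n (x : Int) (y : Int) snake (fuel + (y + 1))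
        = pvLoopA array n 0 ((x : Int) + (y : Int) + 1)
            (snake ++ (List.range (y + 1)).filterMap
              (fun j => (array[y - j]?).bind (fun row => row[x + j]?))) fuel := by
  intro y
  induction y with
  | zero =>
      intro x snake fuel h
      rw [show fuel + (0 + 1) = fuel + 1 from rfl, pvLoopA]
      rw [if_pos (by constructor <;> omega)]
      rw [pick_eq array 0 x snake]
      simp only [Nat.cast_zero, add_zero, if_true]
      have hfin : List.filterMap (fun j => (array[0 - j]?).bind (fun row => row[x + j]?)) (List.range (0 + 1))
          = ((array[0]?).bind (fun row => row[x]?)).toList := by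
        simp only [zero_add, List.range_one, List.filterMap_cons, List.filterMap_nil,
          Nat.sub_zero, Nat.add_zero]
        cases (array[0]?).bind (fun row => row[x]?) <;> simp
      rw [hfin]
  | succ y ih =>
      intro x snake fuel h
      rw [show fuel + (y + 1 + 1) = (fuel + (y + 1)) + 1 from by omega, pvLoopA]
      rw [if_pos (by constructor <;> omega)]
      rw [pick_eq array (y + 1) x snake]
      rw [if_neg (by omega)]
      have e1 : ((x : Int) + 1) = (((x + 1 : Nat)) : Int) := by push_cast; ring
      have e2 : ((((y + 1 : Nat)) : Int) - 1) = ((y : Nat) : Int) := by push_cast; ring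
      rw [e1, e2, ih (x + 1) _ fuel (by push_cast at h ⊢; omega)]
      have e3 : (((x + 1 : Nat) : Int) + (y : Int) + 1) = ((x : Int) + ((y + 1 : Nat) : Int) + 1) := by
        push_cast; ring
      rw [e3, List.append_assoc]
      congr 2
      rw [diag_step]

-- A's loop from (0, d) emits the diagonals d, d + 1, …, n - 1
lemma loop_outer (array : List (List Int)) (n : Int) :
    ∀ (k d : Nat) (snake : List Int) (fuel : Nat), d + k = n.toNat →
      pvLoopA array n 0 (d : Int) snake (fuel + pvFuelAux k d)
        = snake ++ (List.range' d k).flatMap (pvDiag array) := by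
  intro k
  induction k with
  | zero =>
      intro d snake fuel h
      rw [show fuel + pvFuelAux 0 d = fuel + 1 from rfl, pvLoopA, if_neg (by omega)]
      simp
  | succ k ih =>
      intro d snake fuel h
      rw [show fuel + pvFuelAux (k + 1) d = (fuel + pvFuelAux k (d + 1)) + (d + 1) from by
        simp [pvFuelAux]; omega]
      have hr := loop_run array n d 0 snake (fuel + pvFuelAux k (d + 1)) (by omega)
      simp only [Nat.cast_zero, zero_add] at hr
      rw [hr]
      have e : ((d : Int) + 1) = (((d + 1 : Nat)) : Int) := by push_cast; ring
      rw [e, ih (d + 1) _ fuel (by omega)]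
      rw [List.range'_succ, List.flatMap_cons, List.append_assoc]
      rfl

lemma A_eq (array : List (List Int)) :
    zigzag_reduce array = (List.range (pvN array)).flatMap (pvDiag array) := by
  unfold zigzag_reduce
  have h0 := pvW_A array 0
  simp only [Nat.cast_zero] at h0
  simp only [h0]
  set n : Int := ((array.foldl (fun m r => max m r.length) 0 : Nat) : Int) + (array.length : Int) - 1 with hn
  have hle : pvFuelAux n.toNat 0 ≤ (n.toNat + 1) * (n.toNat + 1) := by
    simpa using pvFuelAux_le n.toNat 0
  have hsplit : (n.toNat + 1) * (n.toNat + 1)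
      = ((n.toNat + 1) * (n.toNat + 1) - pvFuelAux n.toNat 0) + pvFuelAux n.toNat 0 := by omega
  rw [hsplit]
  have ho := loop_outer array n n.toNat 0 []
      ((n.toNat + 1) * (n.toNat + 1) - pvFuelAux n.toNat 0) (by omega)
  simp only [Nat.cast_zero] at ho
  rw [ho, List.range_eq_range']
  simp [pvN, pvW, hn]

-- B's per-cell body appends exactly the existing cell (x, d - x)
lemma cellB_eq (array : List (List Int)) (d j : Nat) (hj : j ≤ d) :
    pvCellB array (d : Int) (j : Int) = ((array[d - j]?).bind (fun row => row[j]?)).toList := by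
  unfold pvCellB
  rw [show ((d : Int) - (j : Int)) = (((d - j : Nat)) : Int) from by omega]
  rw [PySem.List.pyGet?_natCast]
  cases hrow : array[d - j]? with
  | none => simp
  | some row =>
      simp only [Option.bind_some]
      rw [PySem.List.pyGet?_natCast]
      by_cases hx : j < row.length
      · rw [if_pos (by exact_mod_cast hx)]
      · rw [if_neg (by exact_mod_cast hx), List.getElem?_eq_none_iff.mpr (by omega)]
        simp

-- a flatMap over range m may be restricted to the window [a, a+c) outside which it is empty
lemma restrict (F : Nat → List Int) (a c m : Nat) (hm : c = 0 ∨ a + c ≤ m)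
    (hout : ∀ j, j < m → (j < a ∨ a + c ≤ j) → F j = []) :
    (List.range m).flatMap F = (List.range c).flatMap (fun k => F (a + k)) := by
  rcases Nat.eq_zero_or_pos c with hc | hc
  · subst hc
    rw [List.range_zero, List.flatMap_nil]
    apply List.flatMap_eq_nil_iff.mpr
    intro j hjm
    exact hout j (List.mem_range.mp hjm) (by omega)
  · rcases hm with hm | hm
    · omega
    · have hsplit : List.range m
          = List.range' 0 a ++ List.range' (0 + a) c ++ List.range' (0 + (a + c)) (m - (a + c)) := by
        rw [List.range'_append_1, List.range'_append_1, List.range_eq_range']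
        congr 1
        omega
      rw [hsplit, List.flatMap_append, List.flatMap_append]
      simp only [Nat.zero_add] at *
      have h1 : (List.range' 0 a).flatMap F = [] := by
        apply List.flatMap_eq_nil_iff.mpr
        intro j hj
        have := List.mem_range'_1.mp hj
        exact hout j (by omega) (by omega)
      have h3 : (List.range' (a + c) (m - (a + c))).flatMap F = [] := by
        apply List.flatMap_eq_nil_iff.mpr
        intro j hj
        have := List.mem_range'_1.mp hj
        exact hout j (by omega) (by omega)
      rw [h1, h3, List.nil_append, List.append_nil]
      rw [List.range'_eq_map_range, List.flatMap_map]

-- B's bounded inner loop over diagonal d produces exactly pvDiag d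
lemma diagB (array : List (List Int)) (d : Nat) :
    (PySem.List.pyRange (max 0 ((d : Int) - (array.length : Int) + 1))
        (min ((d : Int) + 1) ((pvW array : Nat) : Int)) 1).flatMap (pvCellB array (d : Int))
      = pvDiag array d := by
  have hhi_le : min ((d : Int) + 1) ((pvW array : Nat) : Int) ≤ (d : Int) + 1 := min_le_left _ _
  have hlo_nonneg : (0 : Int) ≤ max 0 ((d : Int) - (array.length : Int) + 1) := le_max_left _ _
  rw [PySem.List.pyRange_one, List.flatMap_map]
  unfold pvDiag
  rw [List.filterMap_eq_flatMap_toList]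
  rw [restrict (fun j => ((array[d - j]?).bind (fun row => row[j]?)).toList)
      (max 0 ((d : Int) - (array.length : Int) + 1)).toNat
      ((min ((d : Int) + 1) ((pvW array : Nat) : Int)) - (max 0 ((d : Int) - (array.length : Int) + 1))).toNat
      (d + 1) (by omega)]
  · apply List.flatMap_congr
    intro k hk
    have hkc := List.mem_range.mp hk
    have hcast : max 0 ((d : Int) - (array.length : Int) + 1) + (k : Int)
        = (((max 0 ((d : Int) - (array.length : Int) + 1)).toNat + k : Nat) : Int) := by omega
    rw [hcast, cellB_eq array d _ (by omega)]
  · intro j hjm hcase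
    cases ho : array[d - j]? with
    | none => simp
    | some row =>
        cases hrj : row[j]? with
        | none => simp [hrj]
        | some v =>
            exfalso
            have hdj : d - j < array.length := (List.getElem?_eq_some_iff.mp ho).1
            have hjr : j < row.length := (List.getElem?_eq_some_iff.mp hrj).1
            have hle : row.length ≤ pvW array := pvLen_le_W array row (List.mem_of_getElem? ho)
            omega

lemma B_eq (array : List (List Int)) :
    zigzag_reduce_alt array = (List.range (pvN array)).flatMap (pvDiag array) := by
  unfold zigzag_reduce_alt
  simp only [pvW_B]
  have hbig : (fun (out : List Int) (d : Int) =>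
      (PySem.List.pyRange (max 0 (d - (array.length : Int) + 1)) (min (d + 1) ((pvW array : Nat) : Int)) 1).foldl
        (fun out x =>
          match PySem.List.pyGet? array (d - x) with
          | some row =>
              if x < (row.length : Int) then
                match PySem.List.pyGet? row x with
                | some v => out ++ [v]
                | none => out
              else out
          | none => out) out)
      = (fun (out : List Int) (d : Int) => out ++
          (PySem.List.pyRange (max 0 (d - (array.length : Int) + 1)) (min (d + 1) ((pvW array : Nat) : Int)) 1).flatMap
            (pvCellB array d)) := by
    funext out d
    have hb : (fun (out : List Int) (x : Int) =>
        match PySem.List.pyGet? array (d - x) with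
        | some row =>
            if x < (row.length : Int) then
              match PySem.List.pyGet? row x with
              | some v => out ++ [v]
              | none => out
            else out
        | none => out)
        = (fun (out : List Int) (x : Int) => out ++ pvCellB array d x) := by
      funext out x
      unfold pvCellB
      cases PySem.List.pyGet? array (d - x) with
      | none => simp
      | some row =>
          dsimp only
          by_cases hx : x < (row.length : Int)
          · simp only [if_pos hx]
            cases PySem.List.pyGet? row x <;> simp
          · simp only [if_neg hx, List.append_nil]
    rw [hb, PySem.List.foldl_append_eq_flatMap]
  rw [hbig, PySem.List.foldl_append_eq_flatMap, List.nil_append]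
  rw [PySem.List.pyRange_one, List.flatMap_map]
  have : (((pvW array : Nat) : Int) + (array.length : Int) - 1 - 0).toNat = pvN array := by
    simp [pvN]
  rw [this]
  apply List.flatMap_congr
  intro k hk
  simp only [zero_add]
  exact diagB array k

-- ===== VERDICT (by name: the statement is the Claim_ definition above) =====
theorem zigzag_reduce_spec : Claim_equal_zigzag_reduce := by
  intro array _
  unfold Spec_zigzag_reduce
  rw [A_eq, B_eq]
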